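-- pv_equiv track=rewrite | github.com/Viknesh-Rajaramon/Leetcode-Problems | Algorithms/Medium/3809_Best_Reachable_Tower.py | bestTower
-- ===== SOURCE A (Python) =====
-- from typing import List
-- from math import inf
--
-- def bestTower(towers: List[List[int]], center: List[int], radius: int) -> List[int]:
--     result, best_q = None, -inf
--     for x, y, q in towers:
--         if abs(x - center[0]) + abs(y - center[1]) <= radius:
--             if not result or best_q < q:
--                 result = [x, y]
--                 best_q = q
--             elif best_q == q and (x < result[0] or (x == result[0] and y < result[1])):
--                     result = [x, y]
--                     best_q = q
--
--     return result if result else [-1, -1]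
-- ===== SOURCE B (Python) =====
-- def bestTower(towers, center, radius):
--     def best(lo, hi):
--         # best in-range tower among towers[lo:hi] as (x, y, q), or None
--         if hi - lo <= 0:
--             return None
--         if hi - lo == 1:
--             x, y, q = towers[lo]
--             if abs(x - center[0]) + abs(y - center[1]) <= radius:
--                 return (x, y, q)
--             return None
--         mid = (lo + hi) // 2
--         l, r = best(lo, mid), best(mid, hi)
--         if l is None:
--             return r
--         if r is None:
--             return l
--         return l if (-l[2], l[0], l[1]) <= (-r[2], r[0], r[1]) else r
--
--     b = best(0, len(towers))
--     return [b[0], b[1]] if b is not None else [-1, -1]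
-- ===== Notes on version B (the rewrite author's own statement) =====
-- stated objective: alternative
-- what changed: A's single linear scan with a running best and inline tie-break branching is replaced by a divide-and-conquer tournament: recurse on index halves of towers, each leaf tests one tower's range, and winners are merged pairwise with a lexicographic (-q, x, y) tuple comparison.
import Mathlib
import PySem

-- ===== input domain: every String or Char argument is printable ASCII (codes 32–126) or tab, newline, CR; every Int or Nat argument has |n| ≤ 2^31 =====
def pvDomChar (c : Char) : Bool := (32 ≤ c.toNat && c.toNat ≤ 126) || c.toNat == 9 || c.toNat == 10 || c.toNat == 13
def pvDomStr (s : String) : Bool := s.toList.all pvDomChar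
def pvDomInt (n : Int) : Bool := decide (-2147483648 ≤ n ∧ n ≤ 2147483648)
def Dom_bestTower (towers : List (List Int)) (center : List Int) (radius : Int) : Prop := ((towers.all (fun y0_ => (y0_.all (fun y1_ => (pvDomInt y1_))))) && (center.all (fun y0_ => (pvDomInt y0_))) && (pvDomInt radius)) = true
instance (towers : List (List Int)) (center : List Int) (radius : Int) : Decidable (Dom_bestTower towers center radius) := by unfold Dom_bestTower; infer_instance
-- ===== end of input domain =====

-- B replaces A's single running-best linear scan by a divide-and-conquer tournament on
-- index halves, merging half-winners with a lexicographic (-q, x, y) comparison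
-- (objective: alternative); same return value on all of Pre_.

-- ===== PORT A =====
-- one step of A's loop body; a row that is not [x, y, q] would make Python's unpacking
-- raise ValueError, which Pre_ excludes, so the catch-all keeps the state
def bestTowerStep (c0 c1 radius : Int) (st : Option (Int × Int × Int)) (row : List Int) :
    Option (Int × Int × Int) :=
  match row with
  | [x, y, q] =>
    if |x - c0| + |y - c1| ≤ radius then
      match st with
      | none => some (x, y, q)                                  -- 'not result or …' fires
      | some (rx, ry, bq) =>
        if bq < q then some (x, y, q)
        else if bq = q ∧ (x < rx ∨ (x = rx ∧ y < ry)) then some (x, y, q)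
        else some (rx, ry, bq)
    else st
  | _ => st

def bestTower (towers : List (List Int)) (center : List Int) (radius : Int) : List Int :=
  let c0 := PySem.List.pyGetD center 0 0
  let c1 := PySem.List.pyGetD center 1 0
  match towers.foldl (bestTowerStep c0 c1 radius) none with
  | none => [-1, -1]
  | some (x, y, _) => [x, y]

-- ===== PORT B =====
-- Python's tuple comparison (-l[2], l[0], l[1]) <= (-r[2], r[0], r[1]): exact
-- lexicographic order, hand-ported (Mathlib's '≤' on products is not Python's)
def bestKeyLe (a b : Int × Int × Int) : Bool :=
  decide (-(a.2.2) < -(b.2.2) ∨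
    (-(a.2.2) = -(b.2.2) ∧ (a.1 < b.1 ∨ (a.1 = b.1 ∧ a.2.1 ≤ b.2.1))))

-- best(lo, hi) of Source B: best in-range tower among towers[lo:hi] as (x, y, q), or none;
-- towers[lo] read with pyGetD (the leaf is only reached with 0 ≤ lo < len towers)
-- merge of two half-winners: 'if l is None: return r; if r is None: return l;
-- return l if key(l) <= key(r) else r'
def bestMerge (l r : Option (Int × Int × Int)) : Option (Int × Int × Int) :=
  match l, r with
  | none, r => r
  | some a, none => some a
  | some a, some b => if bestKeyLe a b then some a else some b

def bestRange (towers : List (List Int)) (c0 c1 radius lo hi : Int) :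
    Option (Int × Int × Int) :=
  if hi - lo ≤ 0 then none
  else if hi - lo = 1 then
    let row := PySem.List.pyGetD towers lo []
    let x := PySem.List.pyGetD row 0 0
    let y := PySem.List.pyGetD row 1 0
    let q := PySem.List.pyGetD row 2 0
    if |x - c0| + |y - c1| ≤ radius then some (x, y, q) else none
  else
    let mid := PySem.Int.floordiv (lo + hi) 2
    bestMerge (bestRange towers c0 c1 radius lo mid) (bestRange towers c0 c1 radius mid hi)
termination_by (hi - lo).toNat
decreasing_by
  all_goals
    rw [PySem.Int.floordiv_eq_ediv_of_pos (by norm_num : (0:Int) < 2)]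
    omega

def bestTower_alt (towers : List (List Int)) (center : List Int) (radius : Int) : List Int :=
  let c0 := PySem.List.pyGetD center 0 0
  let c1 := PySem.List.pyGetD center 1 0
  match bestRange towers c0 c1 radius 0 (towers.length : Int) with
  | none => [-1, -1]
  | some (x, y, _) => [x, y]

-- ===== PRECONDITION & SPEC =====
-- Pre_ excludes exactly the inputs where A raises: a row that is not an [x, y, q] triple
-- (ValueError on unpacking) or, when some tower exists, a center with fewer than two
-- coordinates (IndexError on center[0]/center[1]).
def Pre_bestTower (towers : List (List Int)) (center : List Int) (radius : Int) : Prop :=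
  (∀ r ∈ towers, r.length = 3) ∧ (towers = [] ∨ 2 ≤ center.length)
instance (towers : List (List Int)) (center : List Int) (radius : Int) : Decidable (Pre_bestTower towers center radius) := by unfold Pre_bestTower; infer_instance

def pvWitness_bestTower : List (List Int) × List Int × Int := ([[1, 2, 5], [0, 0, 5]], [0, 1], 4)

def Spec_bestTower (towers : List (List Int)) (center : List Int) (radius : Int) (out : List Int) : Prop := out = bestTower_alt towers center radius
instance (towers : List (List Int)) (center : List Int) (radius : Int) (out : List Int) : Decidable (Spec_bestTower towers center radius out) := by unfold Spec_bestTower; infer_instance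

-- ===== CLAIM (what is proved, stated in full; the proofs are below) =====
def Claim_equal_bestTower : Prop := ∀ (towers : List (List Int)) (center : List Int) (radius : Int), Dom_bestTower towers center radius → Pre_bestTower towers center radius → Spec_bestTower towers center radius (bestTower towers center radius)

-- ===== LEMMAS AND PROOFS =====

-- the (x, y, q) triple stored for a row, read off with pyGetD like both ports do
def pvTriple (r : List Int) : Int × Int × Int :=
  (PySem.List.pyGetD r 0 0, PySem.List.pyGetD r 1 0, PySem.List.pyGetD r 2 0)

-- the in-range candidate triples of a row list
def pvCands (c0 c1 R : Int) (rows : List (List Int)) : List (Int × Int × Int) :=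
  (rows.filter (fun t => decide (|PySem.List.pyGetD t 0 0 - c0| +
      |PySem.List.pyGetD t 1 0 - c1| ≤ R))).map pvTriple

-- "r is the best of c": none on empty, else a member ≤ (under the key) all members
def pvIsBest (c : List (Int × Int × Int)) (r : Option (Int × Int × Int)) : Prop :=
  match r with
  | none => c = []
  | some a => a ∈ c ∧ ∀ b ∈ c, bestKeyLe a b = true

lemma pvTriple_lit (x y q : Int) : pvTriple [x, y, q] = (x, y, q) := by
  simp [pvTriple, PySem.List.pyGetD, PySem.List.pyGet?, PySem.List.pyIdx?]

lemma bestKeyLe_refl (a : Int × Int × Int) : bestKeyLe a a = true := by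
  simp [bestKeyLe]

lemma bestKeyLe_trans {a b c : Int × Int × Int}
    (h1 : bestKeyLe a b = true) (h2 : bestKeyLe b c = true) : bestKeyLe a c = true := by
  simp only [bestKeyLe, decide_eq_true_eq] at *; omega

lemma bestKeyLe_total (a b : Int × Int × Int)
    (h : ¬ bestKeyLe a b = true) : bestKeyLe b a = true := by
  simp only [bestKeyLe, decide_eq_true_eq] at *; omega

lemma bestKeyLe_antisymm {a b : Int × Int × Int}
    (h1 : bestKeyLe a b = true) (h2 : bestKeyLe b a = true) : a = b := by
  obtain ⟨a1, a2, a3⟩ := a; obtain ⟨b1, b2, b3⟩ := b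
  simp only [bestKeyLe, decide_eq_true_eq, Prod.mk.injEq] at *; omega

lemma pvIsBest_unique {c : List (Int × Int × Int)} {r1 r2 : Option (Int × Int × Int)}
    (h1 : pvIsBest c r1) (h2 : pvIsBest c r2) : r1 = r2 := by
  match r1, r2 with
  | none, none => rfl
  | none, some b => simp only [pvIsBest] at h1 h2; subst h1; exact absurd h2.1 (by simp)
  | some a, none => simp only [pvIsBest] at h1 h2; subst h2; exact absurd h1.1 (by simp)
  | some a, some b =>
    simp only [pvIsBest] at h1 h2
    exact congrArg some (bestKeyLe_antisymm (h1.2 b h2.1) (h2.2 a h1.1))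

lemma pvIsBest_combine {c1 c2 : List (Int × Int × Int)} {l r : Option (Int × Int × Int)}
    (hl : pvIsBest c1 l) (hr : pvIsBest c2 r) :
    pvIsBest (c1 ++ c2) (bestMerge l r) := by
  match l, r with
  | none, none =>
    simp only [pvIsBest, bestMerge] at *
    rw [hl, hr]; rfl
  | none, some b =>
    simp only [pvIsBest, bestMerge] at *
    subst hl; exact ⟨by simpa using hr.1, by simpa using hr.2⟩
  | some a, none =>
    simp only [pvIsBest, bestMerge] at *
    subst hr; exact ⟨by simpa using hl.1, by simpa using hl.2⟩
  | some a, some b =>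
    simp only [pvIsBest, bestMerge] at *
    by_cases h : bestKeyLe a b = true
    · simp only [h, if_pos]
      refine ⟨List.mem_append_left _ hl.1, ?_⟩
      intro t ht
      rcases List.mem_append.1 ht with h1 | h2
      · exact hl.2 t h1
      · exact bestKeyLe_trans h (hr.2 t h2)
    · simp only [h, Bool.false_eq_true, if_false]
      have hba := bestKeyLe_total a b h
      refine ⟨List.mem_append_right _ hr.1, ?_⟩
      intro t ht
      rcases List.mem_append.1 ht with h1 | h2
      · exact bestKeyLe_trans hba (hl.2 t h1)
      · exact hr.2 t h2

lemma pvCands_append (c0 c1 R : Int) (l1 l2 : List (List Int)) :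
    pvCands c0 c1 R (l1 ++ l2) = pvCands c0 c1 R l1 ++ pvCands c0 c1 R l2 := by
  simp [pvCands, List.filter_append]

-- A's fold computes the best of the candidates
lemma foldA_isBest (c0 c1 R : Int) :
    ∀ (l : List (List Int)), (∀ r ∈ l, r.length = 3) →
    ∀ (acc : Option (Int × Int × Int)) (c : List (Int × Int × Int)), pvIsBest c acc →
    pvIsBest (c ++ pvCands c0 c1 R l) (l.foldl (bestTowerStep c0 c1 R) acc) := by
  intro l
  induction l with
  | nil => intro _ acc c hc; simpa [pvCands] using hc
  | cons row l ih =>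
    intro hl acc c hc
    have hr : row.length = 3 := hl row (by simp)
    have hl' : ∀ r ∈ l, r.length = 3 := fun r h => hl r (by simp [h])
    match row, hr with
    | [x, y, q], _ =>
    have hx : PySem.List.pyGetD [x, y, q] 0 0 = x := rfl
    have hy : PySem.List.pyGetD [x, y, q] 1 0 = y := rfl
    have hstep : pvIsBest (c ++ pvCands c0 c1 R [[x, y, q]])
        (bestTowerStep c0 c1 R acc [x, y, q]) := by
      simp only [pvCands, List.filter_cons, List.filter_nil, hx, hy, bestTowerStep]
      by_cases hin : |x - c0| + |y - c1| ≤ R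
      · simp only [hin, decide_true, if_pos, List.map_cons, List.map_nil, pvTriple_lit]
        match acc, hc with
        | none, hc =>
          simp only [pvIsBest] at hc; subst hc
          exact ⟨by simp, by intro b hb; simp at hb; subst hb; exact bestKeyLe_refl _⟩
        | some (rx, ry, bq), hc =>
          simp only [pvIsBest] at hc ⊢
          by_cases h1 : bq < q
          · have hk : bestKeyLe (x, y, q) (rx, ry, bq) = true := by
              simp only [bestKeyLe, decide_eq_true_eq]; omega
            simp only [h1, if_pos]
            refine ⟨by simp, ?_⟩
            intro b hb
            rcases List.mem_append.1 hb with hb | hb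
            · exact bestKeyLe_trans hk (hc.2 b hb)
            · simp at hb; subst hb; exact bestKeyLe_refl _
          · rw [if_neg h1]
            by_cases h2 : bq = q ∧ (x < rx ∨ (x = rx ∧ y < ry))
            · have hk : bestKeyLe (x, y, q) (rx, ry, bq) = true := by
                simp only [bestKeyLe, decide_eq_true_eq]; omega
              rw [if_pos h2]
              refine ⟨by simp, ?_⟩
              intro b hb
              rcases List.mem_append.1 hb with hb | hb
              · exact bestKeyLe_trans hk (hc.2 b hb)
              · simp at hb; subst hb; exact bestKeyLe_refl _
            · have hk : bestKeyLe (rx, ry, bq) (x, y, q) = true := by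
                simp only [bestKeyLe, decide_eq_true_eq]; omega
              rw [if_neg h2]
              refine ⟨List.mem_append_left _ hc.1, ?_⟩
              intro b hb
              rcases List.mem_append.1 hb with hb | hb
              · exact hc.2 b hb
              · simp at hb; subst hb; exact hk
      · simpa [hin] using hc
    have := ih hl' (bestTowerStep c0 c1 R acc [x, y, q])
      (c ++ pvCands c0 c1 R [[x, y, q]]) hstep
    simp only [List.foldl_cons]
    have hcc : pvCands c0 c1 R ([x, y, q] :: l) =
        pvCands c0 c1 R [[x, y, q]] ++ pvCands c0 c1 R l :=
      pvCands_append c0 c1 R [[x, y, q]] l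
    rw [hcc, ← List.append_assoc]
    exact this

-- the slice towers[lo:hi] used only in the proofs
def pvSlice (towers : List (List Int)) (lo hi : Int) : List (List Int) :=
  (towers.drop lo.toNat).take (hi - lo).toNat

lemma pvSlice_split (towers : List (List Int)) (lo mid hi : Int)
    (h1 : 0 ≤ lo) (h2 : lo ≤ mid) (h3 : mid ≤ hi) :
    pvSlice towers lo hi = pvSlice towers lo mid ++ pvSlice towers mid hi := by
  unfold pvSlice
  rw [show (hi - lo).toNat = (mid - lo).toNat + (hi - mid).toNat from by omega,
    List.take_add, List.drop_drop,
    show lo.toNat + (mid - lo).toNat = mid.toNat from by omega]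

-- B's recursion computes the best of the slice's candidates
lemma bestRange_isBest (towers : List (List Int)) (c0 c1 R : Int) :
    ∀ (n : Nat) (lo hi : Int), (hi - lo).toNat = n → 0 ≤ lo → hi ≤ (towers.length : Int) →
    pvIsBest (pvCands c0 c1 R (pvSlice towers lo hi)) (bestRange towers c0 c1 R lo hi) := by
  intro n
  induction n using Nat.strong_induction_on with
  | _ n ih =>
    intro lo hi hn h0 hhi
    rw [bestRange]
    by_cases hz : hi - lo ≤ 0
    · rw [if_pos hz]
      have : pvSlice towers lo hi = [] := by
        unfold pvSlice; rw [show (hi - lo).toNat = 0 from by omega]; rfl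
      simp [pvIsBest, this, pvCands]
    · rw [if_neg hz]
      by_cases h1 : hi - lo = 1
      · rw [if_pos h1]
        have hlt : lo.toNat < towers.length := by omega
        have hget : PySem.List.pyGetD towers lo [] = towers[lo.toNat] := by
          have := PySem.List.pyGetD_of_nonneg (xs := towers) (d := ([] : List Int)) h0
          rw [this]; simp [hlt]
        have hslice : pvSlice towers lo hi = [towers[lo.toNat]] := by
          unfold pvSlice
          rw [show (hi - lo).toNat = 1 from by omega, List.take_one, List.head?_drop,
            List.getElem?_eq_getElem hlt]
          rfl
        simp only [hget, hslice, pvCands, List.filter_cons, List.filter_nil]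
        by_cases hin : |PySem.List.pyGetD towers[lo.toNat] 0 0 - c0| +
            |PySem.List.pyGetD towers[lo.toNat] 1 0 - c1| ≤ R
        · simp only [hin, decide_true, if_pos, List.map_cons, List.map_nil, pvIsBest, pvTriple]
          exact ⟨by simp, by intro b hb; simp at hb; subst hb; exact bestKeyLe_refl _⟩
        · simp [pvIsBest, hin]
      · rw [if_neg h1]
        have hmid : lo ≤ PySem.Int.floordiv (lo + hi) 2 ∧
            PySem.Int.floordiv (lo + hi) 2 ≤ hi ∧
            lo < PySem.Int.floordiv (lo + hi) 2 ∧ PySem.Int.floordiv (lo + hi) 2 < hi := by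
          rw [PySem.Int.floordiv_eq_ediv_of_pos (by norm_num : (0:Int) < 2)]
          omega
        set mid := PySem.Int.floordiv (lo + hi) 2 with hmiddef
        have ihl := ih (mid - lo).toNat (by omega) lo mid rfl h0 (by omega)
        have ihr := ih (hi - mid).toNat (by omega) mid hi rfl (by omega) hhi
        rw [pvSlice_split towers lo mid hi h0 hmid.1 hmid.2.1, pvCands_append]
        exact pvIsBest_combine ihl ihr

-- ===== VERDICT (by name: the statement is the Claim_ definition above) =====
theorem bestTower_spec : Claim_equal_bestTower := by
  intro towers center radius _ hpre
  unfold Spec_bestTower bestTower bestTower_alt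
  dsimp only
  set c0 := PySem.List.pyGetD center 0 0
  set c1 := PySem.List.pyGetD center 1 0
  have hA := foldA_isBest c0 c1 radius towers hpre.1 none [] (by simp [pvIsBest])
  simp only [List.nil_append] at hA
  have hB := bestRange_isBest towers c0 c1 radius
    ((towers.length : Int) - 0).toNat 0 (towers.length : Int) rfl le_rfl le_rfl
  have hslice : pvSlice towers 0 (towers.length : Int) = towers := by
    unfold pvSlice; simp
  rw [hslice] at hB
  rw [pvIsBest_unique hA hB]
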